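-- pv_equiv track=rewrite | github.com/brandonbrown122/crowdwave | crowdwave_engine/bias_corrections.py | apply_political_regulatory_correction
-- ===== SOURCE A (Python) =====
-- from typing import Dict, List, Optional, Tuple
--
-- def apply_political_regulatory_correction(
--     ranking: Dict[str, int],
--     factors_to_boost: List[str]
-- ) -> Dict[str, int]:
--     """
--     Correct underweighting of political/regulatory concerns.
--     Moves specified factors up in ranking.
--     """
--     adjusted = ranking.copy()
--
--     for factor in factors_to_boost:
--         if factor in adjusted:
--             # Move up 1.5 positions (round to nearest)
--             current_rank = adjusted[factor]
--             new_rank = max(1, current_rank - 2)  # Can't go below 1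
--
--             # Adjust other ranks
--             for other_factor, other_rank in adjusted.items():
--                 if other_factor != factor and other_rank >= new_rank and other_rank < current_rank:
--                     adjusted[other_factor] += 1
--
--             adjusted[factor] = new_rank
--
--     return adjusted
-- ===== SOURCE B (Python) =====
-- def apply_political_regulatory_correction(ranking, factors_to_boost):
--     """
--     Correct underweighting of political/regulatory concerns.
--     Rank->factors buckets: each boost touches at most the two affected
--     rank buckets instead of rescanning the whole ranking.
--     """
--     adjusted = ranking.copy()
--     buckets = {}
--     for factor, rank in adjusted.items():
--         buckets.setdefault(rank, []).append(factor)
--     for factor in factors_to_boost: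
--         if factor in adjusted:
--             current = adjusted[factor]
--             new_rank = max(1, current - 2)
--             # only ranks current-1 and current-2 can lie in [new_rank, current)
--             for rank in (current - 1, current - 2):
--                 if new_rank <= rank:
--                     bucket = buckets.get(rank, [])
--                     buckets[rank] = []
--                     for other in bucket:
--                         adjusted[other] = rank + 1
--                         buckets.setdefault(rank + 1, []).append(other)
--             buckets[current] = [g for g in buckets.get(current, []) if g != factor]
--             buckets.setdefault(new_rank, []).append(factor)
--             adjusted[factor] = new_rank
--     return adjusted
-- ===== Notes on version B (the rewrite author's own statement) =====
-- stated objective: alternative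
-- what changed: B builds a rank->factors bucket index once and, per boosted factor, updates only the (at most two) affected rank buckets and the factor's own bucket, instead of A's full rescan of the whole ranking for every boost; measured faster on rankings with mostly distinct ranks but not on duplicate-heavy ones, so no speed is claimed.
import Mathlib
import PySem

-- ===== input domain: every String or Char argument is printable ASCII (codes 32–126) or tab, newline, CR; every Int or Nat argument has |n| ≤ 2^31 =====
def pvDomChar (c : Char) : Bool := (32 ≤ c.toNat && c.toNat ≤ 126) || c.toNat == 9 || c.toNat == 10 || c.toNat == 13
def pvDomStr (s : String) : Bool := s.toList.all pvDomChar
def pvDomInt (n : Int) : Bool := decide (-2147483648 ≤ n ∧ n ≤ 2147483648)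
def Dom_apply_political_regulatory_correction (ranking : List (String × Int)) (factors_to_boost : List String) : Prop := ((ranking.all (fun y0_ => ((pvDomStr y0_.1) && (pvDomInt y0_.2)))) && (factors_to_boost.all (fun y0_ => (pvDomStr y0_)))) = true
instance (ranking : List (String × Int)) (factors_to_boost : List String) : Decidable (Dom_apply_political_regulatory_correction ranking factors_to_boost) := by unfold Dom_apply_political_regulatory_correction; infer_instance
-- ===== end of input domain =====

-- B replaces A's per-boost full rescan of the ranking by a rank->factors bucket
-- index touching only the (at most two) affected rank buckets per boost.

-- ===== PORT A =====
-- body of A's outer loop: one boosted factor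
def pvAStep (adjusted : PySem.Dict String Int) (factor : String) : PySem.Dict String Int :=
  if adjusted.contains factor then
    let current_rank := adjusted.getD factor 0
    let new_rank := max 1 (current_rank - 2)
    let adjusted2 := adjusted.items.foldl
      (fun acc p => if p.1 ≠ factor ∧ new_rank ≤ p.2 ∧ p.2 < current_rank
                    then acc.modify p.1 0 (· + 1) else acc) adjusted
    adjusted2.insert factor new_rank
  else adjusted

def apply_political_regulatory_correction (ranking : List (String × Int)) (factors_to_boost : List String) : List (String × Int) :=
  (factors_to_boost.foldl pvAStep (PySem.Dict.ofList ranking)).items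

-- ===== PORT B =====
-- body of B's 'for rank in (current-1, current-2)' loop: shift one rank bucket up by one
def pvBPhase (new_rank : Int)
    (s : PySem.Dict String Int × PySem.Dict Int (List String)) (rank : Int) :
    PySem.Dict String Int × PySem.Dict Int (List String) :=
  if new_rank ≤ rank then
    (s.2.getD rank []).foldl
      (fun s' other => (s'.1.insert other (rank + 1), s'.2.modify (rank + 1) [] (· ++ [other])))
      (s.1, s.2.insert rank [])
  else s

-- body of B's outer loop: one boosted factor
def pvBStep (st : PySem.Dict String Int × PySem.Dict Int (List String)) (factor : String) :
    PySem.Dict String Int × PySem.Dict Int (List String) :=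
  if st.1.contains factor then
    let current := st.1.getD factor 0
    let new_rank := max 1 (current - 2)
    let st2 := [current - 1, current - 2].foldl (pvBPhase new_rank) st
    let b3 := st2.2.insert current ((st2.2.getD current []).filter (fun g => g ≠ factor))
    let b4 := b3.modify new_rank [] (· ++ [factor])
    (st2.1.insert factor new_rank, b4)
  else st

def apply_political_regulatory_correction_alt (ranking : List (String × Int)) (factors_to_boost : List String) : List (String × Int) :=
  let adjusted := PySem.Dict.ofList ranking
  let buckets := adjusted.items.foldl
    (fun b p => b.modify p.2 [] (· ++ [p.1])) (PySem.Dict.empty : PySem.Dict Int (List String))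
  (factors_to_boost.foldl pvBStep (adjusted, buckets)).1.items

-- ===== PRECONDITION & SPEC =====
def Spec_apply_political_regulatory_correction (ranking : List (String × Int)) (factors_to_boost : List String) (out : List (String × Int)) : Prop := out = apply_political_regulatory_correction_alt ranking factors_to_boost
instance (ranking : List (String × Int)) (factors_to_boost : List String) (out : List (String × Int)) : Decidable (Spec_apply_political_regulatory_correction ranking factors_to_boost out) := by unfold Spec_apply_political_regulatory_correction; infer_instance

-- ===== CLAIM (what is proved, stated in full; the proofs are below) =====
def Claim_equal_apply_political_regulatory_correction : Prop := ∀ (ranking : List (String × Int)) (factors_to_boost : List String), Dom_apply_political_regulatory_correction ranking factors_to_boost → Spec_apply_political_regulatory_correction ranking factors_to_boost (apply_political_regulatory_correction ranking factors_to_boost)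

-- ===== LEMMAS AND PROOFS =====

-- invariant of B's loop: buckets group exactly the keys of `d` by their current value
def pvInv (d : PySem.Dict String Int) (b : PySem.Dict Int (List String)) : Prop :=
  d.keys.Nodup ∧ (∀ r, (b.getD r []).Nodup) ∧
  (∀ k r, k ∈ b.getD r [] ↔ (k ∈ d.keys ∧ d.getD k 0 = r))

lemma pv_mem_items_iff (d : PySem.Dict String Int) (hnd : d.keys.Nodup) (k : String) (v : Int) :
    (k, v) ∈ d.items ↔ (k ∈ d.keys ∧ d.getD k 0 = v) := by
  constructor
  · intro h
    exact ⟨PySem.Dict.mem_keys_of_mem_items d h, PySem.Dict.getD_of_mem_items d h hnd 0⟩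
  · rintro ⟨hk, hv⟩
    rw [PySem.Dict.items_eq_map_keys d hnd 0]
    exact List.mem_map.2 ⟨k, hk, by rw [hv]⟩

-- A's inner loop: value of a key after the conditional-increment pass
lemma pvA_fold_getD (factor : String) (nr cur : Int) :
    ∀ (l : List (String × Int)) (d : PySem.Dict String Int) (k : String),
      (l.map Prod.fst).Nodup →
      (l.foldl (fun acc p => if p.1 ≠ factor ∧ nr ≤ p.2 ∧ p.2 < cur
                  then acc.modify p.1 0 (· + 1) else acc) d).getD k 0
        = d.getD k 0 +
          (if ∃ p ∈ l, p.1 = k ∧ p.1 ≠ factor ∧ nr ≤ p.2 ∧ p.2 < cur then 1 else 0)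
  | [], d, k, _ => by simp
  | a :: t, d, k, hnd => by
      simp only [List.map_cons, List.nodup_cons] at hnd
      simp only [List.foldl_cons]
      rw [pvA_fold_getD factor nr cur t _ k hnd.2]
      by_cases hk : k = a.1
      · have hkt : ∀ p ∈ t, ¬ (p.1 = k) := by
          intro p hp he
          apply hnd.1
          rw [← hk, ← he]
          exact List.mem_map_of_mem hp
        by_cases hc : a.1 ≠ factor ∧ nr ≤ a.2 ∧ a.2 < cur
        · rw [if_pos hc, PySem.Dict.getD_modify]
          have h1 : ∃ p ∈ a :: t, p.1 = k ∧ p.1 ≠ factor ∧ nr ≤ p.2 ∧ p.2 < cur :=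
            ⟨a, List.mem_cons_self, hk.symm, hc⟩
          have h2 : ¬ ∃ p ∈ t, p.1 = k ∧ p.1 ≠ factor ∧ nr ≤ p.2 ∧ p.2 < cur := by
            rintro ⟨p, hp, he, _⟩; exact hkt p hp he
          rw [if_pos h1, if_neg h2, if_pos hk, hk]
          ring
        · rw [if_neg hc]
          have h1 : ¬ ∃ p ∈ a :: t, p.1 = k ∧ p.1 ≠ factor ∧ nr ≤ p.2 ∧ p.2 < cur := by
            rintro ⟨p, hp, he, hcc⟩
            rcases List.mem_cons.1 hp with h | h
            · exact hc (h ▸ hcc)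
            · exact hkt p h he
          have h2 : ¬ ∃ p ∈ t, p.1 = k ∧ p.1 ≠ factor ∧ nr ≤ p.2 ∧ p.2 < cur := by
            rintro ⟨p, hp, he, _⟩; exact hkt p hp he
          rw [if_neg h1, if_neg h2]
      · have heq : ∀ (d' : PySem.Dict String Int),
            (if a.1 ≠ factor ∧ nr ≤ a.2 ∧ a.2 < cur
              then d'.modify a.1 0 (· + 1) else d').getD k 0 = d'.getD k 0 := by
          intro d'
          split
          · rw [PySem.Dict.getD_modify, if_neg hk]
          · rfl
        rw [heq d]
        congr 1
        have hiff : (∃ p ∈ a :: t, p.1 = k ∧ p.1 ≠ factor ∧ nr ≤ p.2 ∧ p.2 < cur)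
             ↔ (∃ p ∈ t, p.1 = k ∧ p.1 ≠ factor ∧ nr ≤ p.2 ∧ p.2 < cur) := by
          constructor
          · rintro ⟨p, hp, he, hcc⟩
            rcases List.mem_cons.1 hp with h | h
            · exact absurd (h ▸ he).symm hk
            · exact ⟨p, h, he, hcc⟩
          · rintro ⟨p, hp, hh⟩; exact ⟨p, List.mem_cons_of_mem _ hp, hh⟩
        rw [if_congr hiff rfl rfl]

-- A's inner loop preserves the key list
lemma pvA_fold_keys (factor : String) (nr cur : Int) :
    ∀ (l : List (String × Int)) (d : PySem.Dict String Int),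
      (∀ p ∈ l, p.1 ∈ d.keys) →
      (l.foldl (fun acc p => if p.1 ≠ factor ∧ nr ≤ p.2 ∧ p.2 < cur
                  then acc.modify p.1 0 (· + 1) else acc) d).keys = d.keys
  | [], d, _ => rfl
  | a :: t, d, h => by
      simp only [List.foldl_cons]
      have hkeys : (if a.1 ≠ factor ∧ nr ≤ a.2 ∧ a.2 < cur
          then d.modify a.1 0 (· + 1) else d).keys = d.keys := by
        split
        · rw [PySem.Dict.keys_modify, PySem.Dict.keys_insert_of_contains]
          rw [PySem.Dict.contains_eq_decide_mem_keys]
          simp [h a List.mem_cons_self]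
        · rfl
      rw [pvA_fold_keys factor nr cur t _ (by intro p hp; rw [hkeys]; exact h p (List.mem_cons_of_mem _ hp)), hkeys]

-- characterisation of one A step
lemma pvAStep_keys (d : PySem.Dict String Int) (f : String) :
    (pvAStep d f).keys = d.keys := by
  unfold pvAStep
  split
  · rename_i hf
    have hk := pvA_fold_keys f (max 1 (d.getD f 0 - 2)) (d.getD f 0) d.items d
      (fun p hp => PySem.Dict.mem_keys_of_mem_items d hp)
    rw [PySem.Dict.keys_insert_of_contains, hk]
    rw [PySem.Dict.contains_eq_decide_mem_keys, hk, ← PySem.Dict.contains_eq_decide_mem_keys]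
    exact hf
  · rfl

lemma pvAStep_getD (d : PySem.Dict String Int) (f : String) (hnd : d.keys.Nodup)
    (hf : d.contains f = true) (k : String) :
    (pvAStep d f).getD k 0 =
      if k = f then max 1 (d.getD f 0 - 2)
      else if k ∈ d.keys ∧ max 1 (d.getD f 0 - 2) ≤ d.getD k 0 ∧ d.getD k 0 < d.getD f 0
        then d.getD k 0 + 1 else d.getD k 0 := by
  unfold pvAStep
  rw [if_pos hf]
  rw [PySem.Dict.getD_insert]
  by_cases hk : k = f
  · rw [if_pos hk, if_pos hk]
  · rw [if_neg hk, if_neg hk]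
    rw [pvA_fold_getD f (max 1 (d.getD f 0 - 2)) (d.getD f 0) d.items d k hnd]
    have hiff : (∃ p ∈ d.items, p.1 = k ∧ p.1 ≠ f ∧ max 1 (d.getD f 0 - 2) ≤ p.2 ∧ p.2 < d.getD f 0)
        ↔ (k ∈ d.keys ∧ max 1 (d.getD f 0 - 2) ≤ d.getD k 0 ∧ d.getD k 0 < d.getD f 0) := by
      constructor
      · rintro ⟨⟨x, y⟩, hp, he, hne, h1, h2⟩
        simp only at he h1 h2
        subst he
        have hm := (pv_mem_items_iff d hnd x y).1 hp
        refine ⟨hm.1, ?_, ?_⟩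
        · rw [hm.2]; exact h1
        · rw [hm.2]; exact h2
      · rintro ⟨h1, h2, h3⟩
        exact ⟨(k, d.getD k 0), (pv_mem_items_iff d hnd k _).2 ⟨h1, rfl⟩, rfl, hk, h2, h3⟩
    rw [if_congr hiff rfl rfl]
    by_cases hC : k ∈ d.keys ∧ max 1 (d.getD f 0 - 2) ≤ d.getD k 0 ∧ d.getD k 0 < d.getD f 0
    · rw [if_pos hC, if_pos hC]
    · rw [if_neg hC, if_neg hC]
      ring

-- B helpers: value fold, key preservation, bucket-append fold
lemma pv_fold_insert_getD (v : Int) :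
    ∀ (gs : List String) (d : PySem.Dict String Int) (k : String),
      (gs.foldl (fun d g => d.insert g v) d).getD k 0 = if k ∈ gs then v else d.getD k 0
  | [], d, k => by simp
  | g :: t, d, k => by
      simp only [List.foldl_cons]
      rw [pv_fold_insert_getD v t _ k, PySem.Dict.getD_insert]
      by_cases ht : k ∈ t
      · simp [ht]
      · by_cases hg : k = g <;> simp [ht, hg]

lemma pv_fold_insert_keys (v : Int) :
    ∀ (gs : List String) (d : PySem.Dict String Int),
      (∀ g ∈ gs, g ∈ d.keys) →
      (gs.foldl (fun d g => d.insert g v) d).keys = d.keys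
  | [], _, _ => rfl
  | g :: t, d, h => by
      simp only [List.foldl_cons]
      have hkeys : (d.insert g v).keys = d.keys := by
        rw [PySem.Dict.keys_insert_of_contains]
        rw [PySem.Dict.contains_eq_decide_mem_keys]
        simp [h g List.mem_cons_self]
      rw [pv_fold_insert_keys v t _ (by intro x hx; rw [hkeys]; exact h x (List.mem_cons_of_mem _ hx)), hkeys]

lemma pv_fold_bucket_getD (v : Int) :
    ∀ (gs : List String) (b : PySem.Dict Int (List String)) (s : Int),
      (gs.foldl (fun b g => b.modify v [] (· ++ [g])) b).getD s []
        = b.getD s [] ++ (if s = v then gs else [])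
  | [], b, s => by simp
  | g :: t, b, s => by
      simp only [List.foldl_cons]
      rw [pv_fold_bucket_getD v t _ s, PySem.Dict.getD_modify]
      by_cases hs : s = v <;> simp [hs]

-- initial bucket construction groups keys by value
lemma pv_build_getD :
    ∀ (l : List (String × Int)) (b : PySem.Dict Int (List String)) (r : Int),
      (l.foldl (fun b p => b.modify p.2 [] (· ++ [p.1])) b).getD r []
        = b.getD r [] ++ ((l.filter (fun p => p.2 = r)).map Prod.fst)
  | [], b, r => by simp
  | a :: t, b, r => by
      simp only [List.foldl_cons]
      rw [pv_build_getD t _ r, PySem.Dict.getD_modify]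
      by_cases hr : r = a.2
      · simp [hr]
      · have hne : ¬ (a.2 = r) := fun h => hr h.symm
        simp [hr, hne]

-- one phase (one affected rank bucket) of a B step
lemma pvPhase_spec (nr t : Int) (s : PySem.Dict String Int × PySem.Dict Int (List String))
    (h : pvInv s.1 s.2) :
    pvInv (pvBPhase nr s t).1 (pvBPhase nr s t).2
    ∧ (pvBPhase nr s t).1.keys = s.1.keys
    ∧ (∀ k, (pvBPhase nr s t).1.getD k 0 =
        if nr ≤ t ∧ k ∈ s.1.keys ∧ s.1.getD k 0 = t then t + 1 else s.1.getD k 0) := by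
  obtain ⟨hnd, hbnd, hmem⟩ := h
  unfold pvBPhase
  by_cases hle : nr ≤ t
  · rw [if_pos hle]
    rw [PySem.List.foldl_prod_mk (fun (d : PySem.Dict String Int) (g : String) => d.insert g (t + 1))
      (fun (b : PySem.Dict Int (List String)) (g : String) => b.modify (t + 1) [] (· ++ [g]))]
    dsimp only
    have hsub : ∀ g ∈ s.2.getD t [], g ∈ s.1.keys := fun g hg => ((hmem g t).1 hg).1
    have hvalB : ∀ g ∈ s.2.getD t [], s.1.getD g 0 = t := fun g hg => ((hmem g t).1 hg).2
    have hkeys := pv_fold_insert_keys (t + 1) (s.2.getD t []) s.1 hsub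
    refine ⟨⟨by rw [hkeys]; exact hnd, ?_, ?_⟩, hkeys, ?_⟩
    · -- bucket lists stay duplicate-free
      intro r2
      rw [pv_fold_bucket_getD, PySem.Dict.getD_insert]
      by_cases hr : r2 = t + 1
      · rw [if_pos hr, if_neg (by omega : ¬ r2 = t)]
        refine List.Nodup.append (hbnd r2) (hbnd t) ?_
        intro x hx hx'
        have h1 := hvalB x hx'
        have h2 := ((hmem x r2).1 hx).2
        omega
      · rw [if_neg hr]
        by_cases hrt : r2 = t
        · simp [hrt]
        · simp only [if_neg hrt, List.append_nil]
          exact hbnd r2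
    · -- bucket membership characterisation
      intro k r2
      rw [pv_fold_bucket_getD, PySem.Dict.getD_insert, hkeys, pv_fold_insert_getD]
      by_cases hkB : k ∈ s.2.getD t []
      · have hk1 := hsub k hkB
        have hk2 := hvalB k hkB
        rw [if_pos hkB]
        by_cases hr : r2 = t + 1
        · subst hr
          rw [if_neg (by omega : ¬ (t + 1 : Int) = t), if_pos rfl]
          simp [List.mem_append, hkB, hk1]
        · rw [if_neg hr]
          by_cases hrt : r2 = t
          · rw [if_pos hrt]
            simp only [List.nil_append, List.not_mem_nil, false_iff]
            rintro ⟨_, hc⟩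
            omega
          · simp only [if_neg hrt, List.append_nil]
            constructor
            · intro hx
              have := ((hmem k r2).1 hx).2
              omega
            · rintro ⟨_, hc⟩
              omega
      · rw [if_neg hkB]
        by_cases hr : r2 = t + 1
        · subst hr
          rw [if_neg (by omega : ¬ (t + 1 : Int) = t), if_pos rfl]
          simp only [List.mem_append, hkB, or_false]
          exact hmem k (t + 1)
        · rw [if_neg hr]
          by_cases hrt : r2 = t
          · rw [if_pos hrt]
            simp only [List.nil_append, List.not_mem_nil, false_iff]
            rintro ⟨h1, h2⟩
            rw [hrt] at h2
            exact hkB ((hmem k t).2 ⟨h1, h2⟩)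
          · simp only [if_neg hrt, List.append_nil]
            exact hmem k r2
    · -- value characterisation
      intro k
      rw [pv_fold_insert_getD]
      by_cases hkB : k ∈ s.2.getD t []
      · rw [if_pos hkB, if_pos ⟨hle, hsub k hkB, hvalB k hkB⟩]
      · rw [if_neg hkB, if_neg (by rintro ⟨_, h1, h2⟩; exact hkB ((hmem k t).2 ⟨h1, h2⟩))]
  · rw [if_neg hle]
    exact ⟨⟨hnd, hbnd, hmem⟩, rfl, fun k => (if_neg (fun hc => hle hc.1)).symm⟩

-- moving the boosted factor itself to its new rank keeps the invariant
lemma pvMove_spec (d : PySem.Dict String Int) (b : PySem.Dict Int (List String)) (f : String)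
    (r nr : Int) (h : pvInv d b) (hfk : f ∈ d.keys) (hfv : d.getD f 0 = r) :
    pvInv (d.insert f nr)
      ((b.insert r ((b.getD r []).filter (fun g => g ≠ f))).modify nr [] (· ++ [f])) := by
  obtain ⟨hnd, hbnd, hmem⟩ := h
  have hkeys : (d.insert f nr).keys = d.keys := by
    rw [PySem.Dict.keys_insert_of_contains]
    rw [PySem.Dict.contains_eq_decide_mem_keys]
    simp [hfk]
  have hget : ∀ s, ((b.insert r ((b.getD r []).filter (fun g => g ≠ f))).modify nr [] (· ++ [f])).getD s []
      = (if s = nr then (if nr = r then (b.getD r []).filter (fun g => g ≠ f) else b.getD nr []) ++ [f]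
         else if s = r then (b.getD r []).filter (fun g => g ≠ f) else b.getD s []) := by
    intro s
    rw [PySem.Dict.getD_modify]
    by_cases h1 : s = nr
    · rw [if_pos h1, if_pos h1, PySem.Dict.getD_insert]
    · rw [if_neg h1, if_neg h1, PySem.Dict.getD_insert]
  have hfnotin : ∀ x, ¬ x = r → f ∉ b.getD x [] := by
    intro x hx hc
    have := ((hmem f x).1 hc).2
    rw [hfv] at this
    exact hx this.symm
  refine ⟨by rw [hkeys]; exact hnd, ?_, ?_⟩
  · intro s
    rw [hget]
    by_cases h1 : s = nr
    · rw [if_pos h1]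
      refine List.Nodup.append ?_ (List.nodup_singleton f) ?_
      · by_cases h2 : nr = r
        · rw [if_pos h2]; exact (hbnd r).filter _
        · rw [if_neg h2]; exact hbnd nr
      · intro x hx hxf
        rw [List.mem_singleton] at hxf
        subst hxf
        by_cases h2 : nr = r
        · rw [if_pos h2] at hx
          rw [List.mem_filter] at hx
          simp at hx
        · rw [if_neg h2] at hx
          exact hfnotin nr h2 hx
    · rw [if_neg h1]
      by_cases h2 : s = r
      · rw [if_pos h2]; exact (hbnd r).filter _
      · rw [if_neg h2]; exact hbnd s
  · intro k s
    rw [hget, hkeys, PySem.Dict.getD_insert]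
    by_cases hkf : k = f
    · subst hkf
      rw [if_pos rfl]
      by_cases h1 : s = nr
      · rw [if_pos h1]
        simp only [List.mem_append, List.mem_singleton]
        constructor
        · intro _; exact ⟨hfk, h1.symm⟩
        · intro _
          right
          trivial
      · rw [if_neg h1]
        have hRHS : ¬ (k ∈ d.keys ∧ (nr : Int) = s) := by
          rintro ⟨_, hc⟩; exact h1 hc.symm
        by_cases h2 : s = r
        · rw [if_pos h2]
          simp only [List.mem_filter, decide_not, hRHS, iff_false]
          rintro ⟨_, hc⟩
          simp at hc
        · rw [if_neg h2]
          simp only [hRHS, iff_false]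
          exact hfnotin s h2
    · rw [if_neg hkf]
      have hmemf : ∀ (ys : List String), k ∈ ys ++ [f] ↔ k ∈ ys := by
        intro ys
        simp [List.mem_append, hkf]
      by_cases h1 : s = nr
      · rw [if_pos h1, hmemf]
        by_cases h2 : nr = r
        · rw [if_pos h2, List.mem_filter]
          have : k ∈ b.getD r [] ↔ (k ∈ d.keys ∧ d.getD k 0 = s) := by
            rw [hmem k r, h1, h2]
          rw [← this]
          simp [hkf]
        · rw [if_neg h2]
          rw [hmem k nr, h1]
      · rw [if_neg h1]
        by_cases h2 : s = r
        · rw [if_pos h2, List.mem_filter]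
          have : k ∈ b.getD r [] ↔ (k ∈ d.keys ∧ d.getD k 0 = s) := by
            rw [hmem k r, h2]
          rw [← this]
          simp [hkf]
        · rw [if_neg h2]
          exact hmem k s
lemma pvStep_eq (d : PySem.Dict String Int) (b : PySem.Dict Int (List String)) (f : String)
    (h : pvInv d b) :
    (pvBStep (d, b) f).1 = pvAStep d f ∧ pvInv (pvBStep (d, b) f).1 (pvBStep (d, b) f).2 := by
  obtain ⟨hnd, hbnd, hmem⟩ := h
  by_cases hf : d.contains f = true
  · have hfk : f ∈ d.keys := by
      rw [PySem.Dict.contains_eq_decide_mem_keys] at hf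
      simpa using hf
    have hfp : ((d, b).1.contains f = true) := hf
    unfold pvBStep
    rw [if_pos hfp]
    dsimp only
    have hfold : [d.getD f 0 - 1, d.getD f 0 - 2].foldl (pvBPhase (max 1 (d.getD f 0 - 2))) (d, b)
        = pvBPhase (max 1 (d.getD f 0 - 2)) (pvBPhase (max 1 (d.getD f 0 - 2)) (d, b) (d.getD f 0 - 1)) (d.getD f 0 - 2) := by
      rw [List.foldl_cons, List.foldl_cons, List.foldl_nil]
    rw [hfold]
    obtain ⟨hInv1, hkeys1, hval1⟩ :=
      pvPhase_spec (max 1 (d.getD f 0 - 2)) (d.getD f 0 - 1) (d, b) ⟨hnd, hbnd, hmem⟩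
    have hkeys1' : (pvBPhase (max 1 (d.getD f 0 - 2)) (d, b) (d.getD f 0 - 1)).1.keys = d.keys := hkeys1
    have hval1' : ∀ k : String,
        (pvBPhase (max 1 (d.getD f 0 - 2)) (d, b) (d.getD f 0 - 1)).1.getD k 0 =
          if max 1 (d.getD f 0 - 2) ≤ d.getD f 0 - 1 ∧ k ∈ d.keys ∧ d.getD k 0 = d.getD f 0 - 1
          then d.getD f 0 - 1 + 1 else d.getD k 0 := hval1
    obtain ⟨hInv2, hkeys2, hval2⟩ :=
      pvPhase_spec (max 1 (d.getD f 0 - 2)) (d.getD f 0 - 2)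
        (pvBPhase (max 1 (d.getD f 0 - 2)) (d, b) (d.getD f 0 - 1)) hInv1
    rw [hkeys1'] at hkeys2
    have hfv2 : (pvBPhase (max 1 (d.getD f 0 - 2)) (pvBPhase (max 1 (d.getD f 0 - 2)) (d, b) (d.getD f 0 - 1)) (d.getD f 0 - 2)).1.getD f 0 = d.getD f 0 := by
      rw [hval2 f, hval1' f, hkeys1']
      simp only [hfk, true_and]
      split_ifs <;> omega
    have hfk2 : f ∈ (pvBPhase (max 1 (d.getD f 0 - 2)) (pvBPhase (max 1 (d.getD f 0 - 2)) (d, b) (d.getD f 0 - 1)) (d.getD f 0 - 2)).1.keys := by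
      rw [hkeys2]; exact hfk
    constructor
    · -- dict component equals A's step
      apply PySem.Dict.ext
      have hcont : (pvBPhase (max 1 (d.getD f 0 - 2)) (pvBPhase (max 1 (d.getD f 0 - 2)) (d, b) (d.getD f 0 - 1)) (d.getD f 0 - 2)).1.contains f = true := by
        rw [PySem.Dict.contains_eq_decide_mem_keys]
        simp [hfk2]
      have hkeysL : ((pvBPhase (max 1 (d.getD f 0 - 2)) (pvBPhase (max 1 (d.getD f 0 - 2)) (d, b) (d.getD f 0 - 1)) (d.getD f 0 - 2)).1.insert f (max 1 (d.getD f 0 - 2))).keys = d.keys := by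
        rw [PySem.Dict.keys_insert_of_contains _ _ hcont, hkeys2]
      have hkeysR := pvAStep_keys d f
      rw [PySem.Dict.items_eq_map_keys _ (by rw [hkeysL]; exact hnd) 0,
          PySem.Dict.items_eq_map_keys _ (by rw [hkeysR]; exact hnd) 0, hkeysL, hkeysR]
      apply List.map_congr_left
      intro k hk
      have hv : ((pvBPhase (max 1 (d.getD f 0 - 2)) (pvBPhase (max 1 (d.getD f 0 - 2)) (d, b) (d.getD f 0 - 1)) (d.getD f 0 - 2)).1.insert f (max 1 (d.getD f 0 - 2))).getD k 0 = (pvAStep d f).getD k 0 := by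
        rw [PySem.Dict.getD_insert, pvAStep_getD d f hnd hf k, hval2, hval1', hkeys1']
        by_cases hkf : k = f
        · rw [if_pos hkf, if_pos hkf]
        · rw [if_neg hkf, if_neg hkf]
          simp only [hk, true_and]
          split_ifs <;> omega
      rw [hv]
    · -- invariant re-established
      exact pvMove_spec _ _ f (d.getD f 0) (max 1 (d.getD f 0 - 2)) hInv2 hfk2 hfv2
  · have hfn : ¬ ((d, b).1.contains f = true) := hf
    unfold pvBStep
    rw [if_neg hfn]
    constructor
    · unfold pvAStep
      rw [if_neg hf]
    · exact ⟨hnd, hbnd, hmem⟩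

lemma pv_main (fs : List String) :
    ∀ (d : PySem.Dict String Int) (b : PySem.Dict Int (List String)), pvInv d b →
      (fs.foldl pvBStep (d, b)).1 = fs.foldl pvAStep d := by
  induction fs with
  | nil => intro d b _; rfl
  | cons f t ih =>
      intro d b h
      simp only [List.foldl_cons]
      obtain ⟨h1, h2⟩ := pvStep_eq d b f h
      rw [← h1]
      exact ih (pvBStep (d, b) f).1 (pvBStep (d, b) f).2 h2

lemma pv_init_inv (ranking : List (String × Int)) :
    pvInv (PySem.Dict.ofList ranking)
      ((PySem.Dict.ofList ranking).items.foldl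
        (fun b p => b.modify p.2 [] (· ++ [p.1])) (PySem.Dict.empty : PySem.Dict Int (List String))) := by
  have hnd := PySem.Dict.nodup_keys_ofList (κ := String) (ν := Int) ranking
  have hb : ∀ r, ((PySem.Dict.ofList ranking).items.foldl
      (fun b p => b.modify p.2 [] (· ++ [p.1])) (PySem.Dict.empty : PySem.Dict Int (List String))).getD r []
      = (((PySem.Dict.ofList ranking).items.filter (fun p => p.2 = r)).map Prod.fst) := by
    intro r
    rw [pv_build_getD]
    simp
  have hkeys_def : (PySem.Dict.ofList ranking).keys
      = (PySem.Dict.ofList ranking).items.map Prod.fst := rfl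
  refine ⟨hnd, ?_, ?_⟩
  · intro r
    rw [hb]
    apply List.Nodup.sublist (List.Sublist.map Prod.fst List.filter_sublist)
    rw [← hkeys_def]
    exact hnd
  · intro k r
    rw [hb]
    simp only [List.mem_map, List.mem_filter]
    constructor
    · rintro ⟨⟨x, y⟩, ⟨hp, hy⟩, hx⟩
      simp only at hx hy
      have hy' : y = r := by simpa using hy
      rw [← hx, ← hy']
      exact (pv_mem_items_iff _ hnd x y).1 hp
    · rintro ⟨h1, h2⟩
      refine ⟨(k, (PySem.Dict.ofList ranking).getD k 0),
        ⟨(pv_mem_items_iff _ hnd k _).2 ⟨h1, rfl⟩, ?_⟩, rfl⟩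
      simpa using h2

-- ===== VERDICT (by name: the statement is the Claim_ definition above) =====
theorem apply_political_regulatory_correction_spec : Claim_equal_apply_political_regulatory_correction := by
  intro ranking factors_to_boost _
  unfold Spec_apply_political_regulatory_correction
  show (factors_to_boost.foldl pvAStep (PySem.Dict.ofList ranking)).items
      = (factors_to_boost.foldl pvBStep (PySem.Dict.ofList ranking,
          (PySem.Dict.ofList ranking).items.foldl
            (fun b p => b.modify p.2 [] (· ++ [p.1])) (PySem.Dict.empty : PySem.Dict Int (List String)))).1.items
  rw [pv_main factors_to_boost _ _ (pv_init_inv ranking)]
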